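-- pv_equiv track=rewrite | github.com/lingpy/lingpy | lingpy/sequence/sound_classes.py | get_n_ngrams
-- ===== SOURCE A (Python) =====
-- def _seq_as_list(sequence):
--     if ' ' in sequence and isinstance(sequence, str):
--         return sequence.split(' ')
--     return list(sequence)
--
-- def get_n_ngrams(sequence, ngram=4):
--     """
--     convert a given sequence into a sequence of ngrams.
--     """
--     seq = _seq_as_list(sequence)
--     tobezipped = []
--     for i in range(ngram):
--         prefix = (ngram - i - 1) * ['#']
--         postfix = i * ['$']
--         tobezipped += [tuple(prefix + seq + postfix)]
--
--     return list(zip(*tobezipped))[ngram - 1:]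
-- ===== SOURCE B (Python) =====
-- def _seq_as_list(sequence):
--     if ' ' in sequence and isinstance(sequence, str):
--         return sequence.split(' ')
--     return list(sequence)
--
--
-- def get_n_ngrams(sequence, ngram=4):
--     """
--     convert a given sequence into a sequence of ngrams.
--     """
--     if ngram <= 0:
--         return []
--     seq = _seq_as_list(sequence)
--     padded = seq + (ngram - 1) * ['$']
--     return [tuple(padded[i:i + ngram]) for i in range(len(seq))]
-- ===== Notes on version B (the rewrite author's own statement) =====
-- stated objective: simpler
-- what changed: A builds ngram shifted padded copies of the sequence, transposes them with zip(*...) and discards the first ngram-1 columns; B pads the sequence once with ngram-1 '$' marks and emits each length-ngram sliding window directly, skipping the shifted copies and the transpose.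
import Mathlib
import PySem

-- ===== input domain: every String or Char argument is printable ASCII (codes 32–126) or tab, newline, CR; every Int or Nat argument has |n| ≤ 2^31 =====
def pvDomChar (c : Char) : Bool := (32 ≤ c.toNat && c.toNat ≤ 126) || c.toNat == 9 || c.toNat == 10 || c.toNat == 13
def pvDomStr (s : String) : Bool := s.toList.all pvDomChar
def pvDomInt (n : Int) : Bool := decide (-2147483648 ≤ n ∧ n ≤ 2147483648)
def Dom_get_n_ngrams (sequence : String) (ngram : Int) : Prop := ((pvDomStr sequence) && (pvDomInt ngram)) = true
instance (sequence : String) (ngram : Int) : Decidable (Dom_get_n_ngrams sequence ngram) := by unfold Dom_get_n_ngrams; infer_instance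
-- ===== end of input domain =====

-- B replaces A's build-ngram-shifted-padded-copies-and-zip-transpose construction by one direct
-- sliding-window pass over a single right-padded list (objective: simpler).


-- ===== PORT A =====
-- _seq_as_list (module helper, identical in Source A and Source B, shared by both ports)
def seqAsList (sequence : String) : List String :=
  if PySem.Str.isIn " " sequence then (PySem.Str.split? sequence " ").getD []
  else sequence.toList.map (fun c => String.ofList [c])

-- zip(*rows): Python's zip truncates to the shortest argument; columns in order
def pyZip (ls : List (List String)) : List (List String) :=
  match ls with
  | [] => []
  | l :: rest =>
    (List.range (rest.foldl (fun m x => min m x.length) l.length)).map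
      (fun j => (l :: rest).map (fun x => x.getD j ""))

def get_n_ngrams (sequence : String) (ngram : Int) : List (List String) :=
  let seq := seqAsList sequence
  let tobezipped := (PySem.List.pyRange 0 ngram 1).foldl
      (fun acc i => acc ++ [List.replicate (ngram - i - 1).toNat "#" ++ seq ++ List.replicate i.toNat "$"]) []
  PySem.List.slice (pyZip tobezipped) (some (ngram - 1)) none

-- ===== PORT B =====
def get_n_ngrams_alt (sequence : String) (ngram : Int) : List (List String) :=
  if ngram ≤ 0 then []
  else
    let seq := seqAsList sequence
    let padded := seq ++ List.replicate (ngram - 1).toNat "$"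
    (PySem.List.pyRange 0 (seq.length : Int) 1).map
      (fun i => PySem.List.slice padded (some i) (some (i + ngram)))

-- ===== PRECONDITION & SPEC =====
def Spec_get_n_ngrams (sequence : String) (ngram : Int) (out : List (List String)) : Prop := out = get_n_ngrams_alt sequence ngram
instance (sequence : String) (ngram : Int) (out : List (List String)) : Decidable (Spec_get_n_ngrams sequence ngram out) := by unfold Spec_get_n_ngrams; infer_instance

-- ===== CLAIM (what is proved, stated in full; the proofs are below) =====
def Claim_equal_get_n_ngrams : Prop := ∀ (sequence : String) (ngram : Int), Dom_get_n_ngrams sequence ngram → Spec_get_n_ngrams sequence ngram (get_n_ngrams sequence ngram)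

-- ===== LEMMAS AND PROOFS =====

-- folding min over rows of one common length L leaves L
theorem foldl_min_const (L : Nat) (rest : List (List String)) (h : ∀ x ∈ rest, x.length = L) :
    rest.foldl (fun m x => min m x.length) L = L := by
  induction rest with
  | nil => rfl
  | cons y ys ih =>
    have hy : y.length = L := h y (by simp)
    simp only [List.foldl_cons, hy, min_self]
    exact ih (fun x hx => h x (by simp [hx]))

-- zip(*rows) of equally long rows is the full transpose
theorem pyZip_eq_of_const_length (ls : List (List String)) (L : Nat)
    (hne : ls ≠ []) (h : ∀ x ∈ ls, x.length = L) :
    pyZip ls = (List.range L).map (fun j => ls.map (fun x => x.getD j "")) := by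
  cases ls with
  | nil => exact absurd rfl hne
  | cons l rest =>
    have hl : l.length = L := h l (by simp)
    simp only [pyZip, hl, foldl_min_const L rest (fun x hx => h x (by simp [hx]))]


theorem window_elem (seq : List String) (n k i : Nat) (hn : 1 ≤ n) (hk : k < seq.length) (hi : i < n) :
    (List.replicate (n - 1 - i) "#" ++ seq ++ List.replicate i "$").getD (n - 1 + k) "" =
    (seq ++ List.replicate (n - 1) "$").getD (k + i) "" := by
  have e1 : (List.replicate (n - 1 - i) "#").length ≤ n - 1 + k := by
    rw [List.length_replicate]; omega
  simp only [List.getD_eq_getElem?_getD, List.append_assoc]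
  rcases Nat.lt_or_ge (k + i) seq.length with h | h
  · rw [List.getElem?_append_right e1, List.length_replicate,
        List.getElem?_append_left (by omega), List.getElem?_append_left h,
        show n - 1 + k - (n - 1 - i) = k + i from by omega]
  · rw [List.getElem?_append_right e1, List.length_replicate,
        List.getElem?_append_right (by omega : seq.length ≤ n - 1 + k - (n - 1 - i)),
        List.getElem?_append_right h]
    simp only [List.getElem?_replicate]
    rw [if_pos (by omega), if_pos (by omega)]

theorem row_window (seq : List String) (n k : Nat) (hn : 1 ≤ n) (hk : k < seq.length) :
    (List.range n).map
      (fun i => (List.replicate (n - 1 - i) "#" ++ seq ++ List.replicate i "$").getD (n - 1 + k) "")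
    = List.take n (List.drop k (seq ++ List.replicate (n - 1) "$")) := by
  apply List.ext_getElem
  · simp only [List.length_map, List.length_range, List.length_take, List.length_drop,
      List.length_append, List.length_replicate]
    omega
  · intro i hi1 hi2
    have hin : i < n := by simpa using hi1
    rw [List.getElem_map, List.getElem_range, List.getElem_take, List.getElem_drop]
    have h1 : n - 1 + k < (List.replicate (n - 1 - i) "#" ++ seq ++ List.replicate i "$").length := by
      simp only [List.length_append, List.length_replicate]; omega
    have h2 : k + i < (seq ++ List.replicate (n - 1) "$").length := by
      simp only [List.length_append, List.length_replicate]; omega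
    have hw := window_elem seq n k i hn hk hin
    rw [List.getD_eq_getElem _ _ h2] at hw
    exact hw


theorem get_n_ngrams_eq_alt (sequence : String) (ngram : Int) :
    get_n_ngrams sequence ngram = get_n_ngrams_alt sequence ngram := by
  by_cases hng : ngram ≤ 0
  · -- range(ngram) is empty, zip() is [], slice of [] is []
    simp [get_n_ngrams, get_n_ngrams_alt, hng, PySem.List.pyRange_one_eq_nil hng, pyZip,
      PySem.List.slice]
  · have hpos : 0 < ngram := by omega
    obtain ⟨n, rfl⟩ : ∃ n : ℕ, ngram = (n : Int) := ⟨ngram.toNat, (Int.toNat_of_nonneg (by omega)).symm⟩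
    have hn1 : 1 ≤ n := by exact_mod_cast hpos
    set seq := seqAsList sequence with hseq
    -- the list A zips: the n shifted padded rows
    have hrows : (PySem.List.pyRange 0 (n : Int) 1).foldl
        (fun acc i => acc ++ [List.replicate ((n : Int) - i - 1).toNat "#" ++ seq ++ List.replicate i.toNat "$"]) []
        = (List.range n).map
            (fun k => List.replicate (n - 1 - k) "#" ++ seq ++ List.replicate k "$") := by
      rw [PySem.List.foldl_append_singleton_eq_map, PySem.List.pyRange_one,
        show ((n : Int) - 0).toNat = n from by omega, List.map_map, List.nil_append]
      refine List.map_congr_left ?_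
      intro k hk
      have hk' : k < n := List.mem_range.mp hk
      show List.replicate ((n : Int) - (0 + (k : Int)) - 1).toNat "#" ++ seq ++
          List.replicate ((0 : Int) + (k : Int)).toNat "$"
          = List.replicate (n - 1 - k) "#" ++ seq ++ List.replicate k "$"
      rw [show ((n : Int) - (0 + (k : Int)) - 1).toNat = n - 1 - k from by omega,
          show ((0 : Int) + (k : Int)).toNat = k from by omega]
    have hzip := pyZip_eq_of_const_length
      ((List.range n).map (fun k => List.replicate (n - 1 - k) "#" ++ seq ++ List.replicate k "$"))
      (n - 1 + seq.length)
      (by simp [List.range_eq_nil]; omega)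
      (by
        intro x hx
        obtain ⟨k, hk, rfl⟩ := List.mem_map.mp hx
        have hk' : k < n := List.mem_range.mp hk
        simp
        omega)
    rw [show get_n_ngrams sequence (n : Int) = PySem.List.slice
          (pyZip ((PySem.List.pyRange 0 (n : Int) 1).foldl
            (fun acc i => acc ++ [List.replicate ((n : Int) - i - 1).toNat "#" ++ seq ++ List.replicate i.toNat "$"]) []))
          (some ((n : Int) - 1)) none from rfl, hrows, hzip,
        PySem.List.slice_from _ (by omega : (0:Int) ≤ (n : Int) - 1),
        show ((n : Int) - 1).toNat = n - 1 from by omega]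
    -- B side: unfold to a map over List.range seq.length
    have hB : get_n_ngrams_alt sequence (n : Int) =
        (PySem.List.pyRange 0 (seq.length : Int) 1).map
          (fun i => PySem.List.slice (seq ++ List.replicate ((n : Int) - 1).toNat "$") (some i) (some (i + (n : Int)))) := by
      rw [get_n_ngrams_alt, if_neg (by omega : ¬ ((n : Int) ≤ 0))]
    rw [hB, PySem.List.pyRange_one, show (((seq.length : Int)) - 0).toNat = seq.length from by omega,
        List.map_map, show ((n : Int) - 1).toNat = n - 1 from by omega]
    apply List.ext_getElem
    · simp only [List.length_drop, List.length_map, List.length_range]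
      omega
    · intro k hk1 hk2
      have hklen : k < seq.length := by simpa using hk2
      simp only [List.getElem_drop, List.getElem_map, List.getElem_range, Function.comp_apply]
      rw [show ((0 : Int) + (k : Int)) = (k : Int) from by omega, PySem.List.slice_natCast_add,
          List.map_map]
      exact row_window seq n k hn1 hklen

-- ===== VERDICT (by name: the statement is the Claim_ definition above) =====
theorem get_n_ngrams_spec : Claim_equal_get_n_ngrams := by
  intro sequence ngram _
  exact get_n_ngrams_eq_alt sequence ngram
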